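-- pv_equiv track=rewrite | github.com/melih-unsal/Daily-Coding_Problems | problem_331.py | getNumOfNeededFlips
-- ===== SOURCE A (Python) =====
-- def getNumOfNeededFlips(word):
--     #count the number of xs first
--     x=0
--     for char in word:
--         if char=='x':
--             x+=1
--
--     """
--     initially result equals to x1+...xn when we put y1 it turns out to be y1+x2+x3+...xn when we put y2 it becomes y1+y2+x4+x5+...+xn
--     so if we decrease it by x1 when we put yi we actually adding yi-x(i+1)
--     """
--     min_total=x
--     index=0
--
--     while index<len(word) and word[index]=='x':
--             min_total-=1
--             index+=1
--
--     running_sum=min_total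
--     while index<len(word):
--         while index<len(word) and word[index]=='y':
--             running_sum+=1
--             index+=1
--
--         while index<len(word) and word[index]=='x':
--             running_sum-=1
--             index+=1
--         if running_sum < min_total:
--             min_total=running_sum
--     return min_total
-- ===== SOURCE B (Python) =====
-- def getNumOfNeededFlips(word):
--     flips = 0
--     y_count = 0
--     for char in word:
--         if char == 'y':
--             y_count += 1
--         else:
--             flips = min(flips + 1, y_count)
--     return flips
-- ===== Notes on version B (the rewrite author's own statement) =====
-- stated objective: simpler
-- what changed: B replaces A's prefix-skip plus block-wise while-loop sweep (running split cost, min over x-block boundaries) with the standard one-pass DP: a y-counter and flips = min(flips+1, y_count) per non-y character.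
import Mathlib
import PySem

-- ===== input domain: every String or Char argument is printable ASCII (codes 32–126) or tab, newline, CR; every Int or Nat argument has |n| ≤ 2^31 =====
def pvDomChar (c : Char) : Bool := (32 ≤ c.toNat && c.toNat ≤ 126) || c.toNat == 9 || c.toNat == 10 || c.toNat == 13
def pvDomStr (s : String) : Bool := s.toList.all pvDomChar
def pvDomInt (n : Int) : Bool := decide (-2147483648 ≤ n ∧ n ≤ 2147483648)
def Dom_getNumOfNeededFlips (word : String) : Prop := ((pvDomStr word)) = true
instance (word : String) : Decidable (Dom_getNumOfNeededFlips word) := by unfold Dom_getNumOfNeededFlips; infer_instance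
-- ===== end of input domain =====

-- B replaces A's prefix-skip + block-wise while-loop sweep by the standard one-pass
-- min-flips DP (flips, y_count); objective: simpler.

-- ===== PORT A =====
-- the two identical 'while … word[index]=="x": total-=1' loops of A
def pvWhileX : List Char → Int → List Char × Int
  | [], m => ([], m)
  | c :: rest, m => if c = 'x' then pvWhileX rest (m - 1) else (c :: rest, m)

-- the inner 'while … word[index]=="y": running_sum+=1' loop of A
def pvWhileY : List Char → Int → List Char × Int
  | [], s => ([], s)
  | c :: rest, s => if c = 'y' then pvWhileY rest (s + 1) else (c :: rest, s)

-- A's outer 'while index<len(word)' loop; fuel only totalizes it (Python diverges on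
-- characters outside {x,y}; such inputs are excluded by Pre_ below)
def pvOuter : Nat → List Char → Int → Int → Int
  | 0, _, _, mt => mt
  | Nat.succ f, l, rs, mt =>
    if l.isEmpty then mt
    else
      let p1 := pvWhileY l rs
      let p2 := pvWhileX p1.1 p1.2
      let mt' := if p2.2 < mt then p2.2 else mt
      pvOuter f p2.1 p2.2 mt'

def getNumOfNeededFlips (word : String) : Int :=
  let cs := word.toList
  let x : Int := cs.foldl (fun a c => if c = 'x' then a + 1 else a) 0
  let p := pvWhileX cs x
  pvOuter (p.1.length + 1) p.1 p.2 p.2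

-- ===== PORT B =====
def getNumOfNeededFlips_alt (word : String) : Int :=
  (word.toList.foldl
    (fun s c => if c = 'y' then (s.1, s.2 + 1) else (min (s.1 + 1) s.2, s.2))
    ((0 : Int), (0 : Int))).1

-- ===== PRECONDITION & SPEC =====
-- Pre_ excludes strings containing a character other than 'x'/'y': on those A's outer
-- while loop never advances its index, so Python A loops forever and returns nothing.
def Pre_getNumOfNeededFlips (word : String) : Prop :=
  (word.toList.all (fun c => c == 'x' || c == 'y')) = true
instance (word : String) : Decidable (Pre_getNumOfNeededFlips word) := by
  unfold Pre_getNumOfNeededFlips; infer_instance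

def pvWitness_getNumOfNeededFlips : String := "xyxxyy"

def Spec_getNumOfNeededFlips (word : String) (out : Int) : Prop := out = getNumOfNeededFlips_alt word
instance (word : String) (out : Int) : Decidable (Spec_getNumOfNeededFlips word out) := by unfold Spec_getNumOfNeededFlips; infer_instance

-- ===== CLAIM (what is proved, stated in full; the proofs are below) =====
def Claim_equal_getNumOfNeededFlips : Prop := ∀ (word : String), Dom_getNumOfNeededFlips word → Pre_getNumOfNeededFlips word → Spec_getNumOfNeededFlips word (getNumOfNeededFlips word)

-- ===== LEMMAS AND PROOFS =====

theorem pre_chars {word : String} (h : Pre_getNumOfNeededFlips word) :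
    ∀ c ∈ word.toList, c = 'x' ∨ c = 'y' := by
  intro c hc
  have h2 := List.all_eq_true.mp h c hc
  rcases Bool.or_eq_true_iff.mp h2 with h1 | h1
  · exact Or.inl (by simpa using h1)
  · exact Or.inr (by simpa using h1)

-- number of 'x' / 'y' in a list, as an Int
def xcI (l : List Char) : Int := (l.count 'x' : Int)
def ycI (l : List Char) : Int := (l.count 'y' : Int)

-- the common spec: minimum number of flips to reach x…xy…y (min over all split points)
def best : List Char → Int
  | [] => 0
  | c :: t => min (xcI (c :: t)) ((if c = 'y' then 1 else 0) + best t)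

theorem mem_of_mem_dropWhile {p : Char → Bool} {l : List Char} {x : Char}
    (h : x ∈ l.dropWhile p) : x ∈ l := (List.dropWhile_sublist p).subset h

theorem xcI_cons (c : Char) (t : List Char) :
    xcI (c :: t) = (if c = 'x' then 1 else 0) + xcI t := by
  by_cases h : c = 'x' <;> simp [xcI, List.count_cons, h] <;> push_cast <;> omega

theorem ycI_cons (c : Char) (t : List Char) :
    ycI (c :: t) = (if c = 'y' then 1 else 0) + ycI t := by
  by_cases h : c = 'y' <;> simp [ycI, List.count_cons, h] <;> push_cast <;> omega

theorem best_le_xc : ∀ l : List Char, best l ≤ xcI l := by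
  intro l
  cases l with
  | nil => simp [best, xcI]
  | cons c t =>
    show min (xcI (c :: t)) ((if c = 'y' then 1 else 0) + best t) ≤ xcI (c :: t)
    exact min_le_left _ _

theorem whileX_eq : ∀ (l : List Char) (m : Int),
    pvWhileX l m = (l.dropWhile (· == 'x'), m - ((l.takeWhile (· == 'x')).length : Int)) := by
  intro l
  induction l with
  | nil => intro m; simp [pvWhileX]
  | cons c t ih =>
    intro m
    by_cases h : c = 'x' <;>
      simp [pvWhileX, h, List.dropWhile_cons, List.takeWhile_cons, ih] <;> push_cast <;> omega

theorem whileY_eq : ∀ (l : List Char) (s : Int),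
    pvWhileY l s = (l.dropWhile (· == 'y'), s + ((l.takeWhile (· == 'y')).length : Int)) := by
  intro l
  induction l with
  | nil => intro s; simp [pvWhileY]
  | cons c t ih =>
    intro s
    by_cases h : c = 'y' <;>
      simp [pvWhileY, h, List.dropWhile_cons, List.takeWhile_cons, ih] <;> push_cast <;> omega

theorem xcI_append (a b : List Char) : xcI (a ++ b) = xcI a + xcI b := by
  simp [xcI, List.count_append]

theorem xcI_decomp_x (l : List Char) :
    xcI l = ((l.takeWhile (· == 'x')).length : Int) + xcI (l.dropWhile (· == 'x')) := by
  have e : xcI (l.takeWhile (· == 'x') ++ l.dropWhile (· == 'x')) = xcI l := by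
    rw [List.takeWhile_append_dropWhile]
  have h : (l.takeWhile (· == 'x')).count 'x' = (l.takeWhile (· == 'x')).length := by
    rw [List.count_eq_length]
    intro b hb
    have hbx := List.mem_takeWhile_imp hb
    simp only [beq_iff_eq] at hbx
    exact hbx.symm
  have h' : xcI (l.takeWhile (· == 'x')) = ((l.takeWhile (· == 'x')).length : Int) := by
    simp only [xcI, h]
  rw [← e, xcI_append, h']

theorem xcI_dropY (l : List Char) : xcI l = xcI (l.dropWhile (· == 'y')) := by
  have e : xcI (l.takeWhile (· == 'y') ++ l.dropWhile (· == 'y')) = xcI l := by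
    rw [List.takeWhile_append_dropWhile]
  have h : xcI (l.takeWhile (· == 'y')) = 0 := by
    simp only [xcI]
    rw [show (l.takeWhile (· == 'y')).count 'x' = 0 from ?_]
    · rfl
    · rw [List.count_eq_zero]
      intro hmem
      have := List.mem_takeWhile_imp hmem
      simp at this
  rw [← e, xcI_append, h]
  ring

theorem len_decomp (p : Char → Bool) (l : List Char) :
    l.length = (l.takeWhile p).length + (l.dropWhile p).length := by
  have h := List.length_append (as := l.takeWhile p) (bs := l.dropWhile p)
  rw [List.takeWhile_append_dropWhile] at h
  omega

theorem dropWhile_head_false (p : Char → Bool) :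
    ∀ (l : List Char) (c : Char) (t : List Char), l.dropWhile p = c :: t → p c = false := by
  intro l
  induction l with
  | nil => intro c t h; simp [List.dropWhile] at h
  | cons a l ih =>
    intro c t h
    by_cases ha : p a
    · rw [List.dropWhile_cons_of_pos ha] at h; exact ih _ _ h
    · rw [List.dropWhile_cons_of_neg ha] at h
      cases h; simpa using ha

theorem best_dropX : ∀ l : List Char, best (l.dropWhile (· == 'x')) = best l := by
  intro l
  induction l with
  | nil => simp
  | cons c t ih =>
    by_cases h : c = 'x'
    · subst h
      rw [List.dropWhile_cons_of_pos (by simp), ih]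
      have h1 := best_le_xc t
      show best t = min (xcI ('x' :: t)) ((if ('x' : Char) = 'y' then 1 else 0) + best t)
      rw [xcI_cons, if_pos rfl, if_neg (by decide)]
      omega
    · rw [List.dropWhile_cons_of_neg (by simp [h])]

theorem best_yblock (l : List Char) :
    best l = min (xcI (l.dropWhile (· == 'y')))
      (((l.takeWhile (· == 'y')).length : Int) + best (l.dropWhile (· == 'y'))) := by
  induction l with
  | nil => simp [best, xcI]
  | cons c t ih =>
    by_cases h : c = 'y'
    · rw [List.takeWhile_cons_of_pos (by simp [h]), List.dropWhile_cons_of_pos (by simp [h])]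
      show min (xcI (c :: t)) ((if c = 'y' then 1 else 0) + best t) = _
      rw [if_pos h, xcI_cons, if_neg (by simp [h]), ih, List.length_cons]
      have h2 := xcI_dropY t
      push_cast
      omega
    · rw [List.takeWhile_cons_of_neg (by simp [h]), List.dropWhile_cons_of_neg (by simp [h])]
      have h1 := best_le_xc (c :: t)
      simp only [List.length_nil, Nat.cast_zero]
      omega

theorem outer_spec : ∀ (f : Nat) (l : List Char) (rs mt : Int),
    (∀ c ∈ l, c = 'x' ∨ c = 'y') → (l = [] ∨ ∃ t, l = 'y' :: t) → mt ≤ rs →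
    l.length < f →
    pvOuter f l rs mt = min mt (rs + (best l - xcI l)) := by
  intro f
  induction f with
  | zero => intro l rs mt _ _ _ hlen; omega
  | succ f ih =>
    intro l rs mt hxy hhd hle hlen
    cases l with
    | nil =>
      have h0 : pvOuter (f + 1) [] rs mt = mt := by simp [pvOuter]
      have h1 : best ([] : List Char) = 0 := rfl
      have h2 : xcI ([] : List Char) = 0 := rfl
      rw [h0]
      omega
    | cons c t =>
      have hc : c = 'y' := by
        rcases hhd with h | ⟨t', ht⟩
        · exact absurd h (by simp)
        · have h2 : c = 'y' ∧ t = t' := by simpa using ht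
          exact h2.1
      show (if (c :: t).isEmpty then mt else _) = _
      rw [if_neg (by simp)]
      simp only [whileY_eq, whileX_eq]
      set l0 := (c :: t).dropWhile (· == 'y') with hl0
      set p : Int := (((c :: t).takeWhile (· == 'y')).length : Int) with hp
      set q : Int := ((l0.takeWhile (· == 'x')).length : Int) with hq
      set l' := l0.dropWhile (· == 'x') with hl'
      have hsub1 : ∀ x ∈ l0, x ∈ c :: t := fun x hx => mem_of_mem_dropWhile (hl0 ▸ hx)
      have hsub2 : ∀ x ∈ l', x ∈ c :: t := fun x hx =>
        hsub1 x (mem_of_mem_dropWhile (hl' ▸ hx))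
      have hxy' : ∀ x ∈ l', x = 'x' ∨ x = 'y' := fun x hx => hxy x (hsub2 x hx)
      have hhd' : l' = [] ∨ ∃ t', l' = 'y' :: t' := by
        cases hll : l' with
        | nil => exact Or.inl rfl
        | cons d r =>
          right
          have hdf : ((d == 'x') : Bool) = false := dropWhile_head_false _ l0 d r (hl' ▸ hll)
          have hd : d = 'y' := by
            rcases hxy' d (by rw [hll]; exact List.mem_cons_self) with h | h
            · simp [h] at hdf
            · exact h
          exact ⟨r, by rw [hd]⟩
      have hp1 : 1 ≤ p := by
        rw [hp, List.takeWhile_cons_of_pos (by simp [hc]), List.length_cons]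
        push_cast; omega
      have hlen' : l'.length < f := by
        have e1 := len_decomp (· == 'y') (c :: t)
        have e2 := len_decomp (· == 'x') l0
        simp only [← hl0, ← hl', List.length_cons] at e1 e2
        simp only [List.length_cons] at hlen
        have hp' : (1 : Int) ≤ ((c :: t).takeWhile (· == 'y')).length := by
          rw [← hp]; exact hp1
        omega
      have hrec := ih l' (rs + p - q) (min mt (rs + p - q)) hxy' hhd'
        (min_le_right _ _) hlen'
      have hstep : (if rs + p - q < mt then rs + p - q else mt) = min mt (rs + p - q) := by
        split_ifs <;> omega
      rw [show rs + p - q = rs + p - q from rfl] at hrec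
      have : pvOuter f l' (rs + p - q) (if rs + p - q < mt then rs + p - q else mt)
          = min (min mt (rs + p - q)) ((rs + p - q) + (best l' - xcI l')) := by
        rw [hstep]; exact hrec
      rw [this]
      -- numeric identity
      have b1 := best_yblock (c :: t)
      rw [← hl0, ← hp] at b1
      have b2 : best l' = best l0 := best_dropX l0
      have b3 : xcI (c :: t) = xcI l0 := xcI_dropY (c :: t)
      have b4 : xcI l0 = q + xcI l' := by
        have := xcI_decomp_x l0
        rw [← hq, ← hl'] at this; exact this
      have b5 := best_le_xc l'
      omega

theorem foldl_xcount : ∀ (l : List Char) (a : Int),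
    l.foldl (fun a c => if c = 'x' then a + 1 else a) a = a + xcI l := by
  intro l
  induction l with
  | nil => intro a; simp [xcI]
  | cons c t ih =>
    intro a
    by_cases h : c = 'x' <;> simp [h, ih, xcI_cons] <;> omega

theorem best_app_y : ∀ l : List Char, best (l ++ ['y']) = best l := by
  intro l
  induction l with
  | nil => simp [best, xcI]
  | cons c t ih =>
    show min (xcI (c :: (t ++ ['y']))) ((if c = 'y' then 1 else 0) + best (t ++ ['y']))
        = min (xcI (c :: t)) ((if c = 'y' then 1 else 0) + best t)
    rw [ih]
    have : xcI (c :: (t ++ ['y'])) = xcI (c :: t) := by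
      simp [xcI, List.count_cons, List.count_append]
    rw [this]

theorem best_app_x : ∀ l : List Char, best (l ++ ['x']) = min (best l + 1) (ycI l) := by
  intro l
  induction l with
  | nil => simp [best, xcI, ycI]
  | cons c t ih =>
    show min (xcI (c :: (t ++ ['x']))) ((if c = 'y' then 1 else 0) + best (t ++ ['x']))
        = min (min (xcI (c :: t)) ((if c = 'y' then 1 else 0) + best t) + 1) (ycI (c :: t))
    rw [ih, ycI_cons]
    have hx : xcI (c :: (t ++ ['x'])) = xcI (c :: t) + 1 := by
      simp [xcI, List.count_cons, List.count_append]
      split_ifs <;> push_cast <;> omega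
    rw [hx]
    omega

theorem ycI_app_y (l : List Char) : ycI (l ++ ['y']) = ycI l + 1 := by
  simp [ycI, List.count_append]

theorem ycI_app_x (l : List Char) : ycI (l ++ ['x']) = ycI l := by
  simp [ycI, List.count_append]

theorem bfold_eq : ∀ l : List Char, (∀ c ∈ l, c = 'x' ∨ c = 'y') →
    l.foldl (fun s c => if c = 'y' then (s.1, s.2 + 1) else (min (s.1 + 1) s.2, s.2))
      ((0 : Int), (0 : Int)) = (best l, ycI l) := by
  intro l
  induction l using List.reverseRecOn with
  | nil => intro _; rfl
  | append_singleton l c ih =>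
    intro hxy
    have hl : ∀ x ∈ l, x = 'x' ∨ x = 'y' := fun x hx => hxy x (by simp [hx])
    have hc : c = 'x' ∨ c = 'y' := hxy c (by simp)
    rw [List.foldl_append, ih hl]
    rcases hc with h | h <;> subst h <;>
      simp [best_app_x, ycI_app_x, best_app_y, ycI_app_y]

-- ===== VERDICT (by name: the statement is the Claim_ definition above) =====
theorem getNumOfNeededFlips_spec : Claim_equal_getNumOfNeededFlips := by
  intro word _ hpre
  unfold Spec_getNumOfNeededFlips
  simp only [getNumOfNeededFlips, getNumOfNeededFlips_alt]
  set cs := word.toList with hcs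
  have hxy : ∀ c ∈ cs, c = 'x' ∨ c = 'y' := pre_chars hpre
  -- A side
  simp only [foldl_xcount, whileX_eq]
  set l1 := cs.dropWhile (· == 'x') with hl1
  set a : Int := ((cs.takeWhile (· == 'x')).length : Int) with ha
  have hmt : 0 + xcI cs - a = xcI l1 := by
    have := xcI_decomp_x cs
    rw [← ha, ← hl1] at this; omega
  have hhd : l1 = [] ∨ ∃ t, l1 = 'y' :: t := by
    cases hll : l1 with
    | nil => exact Or.inl rfl
    | cons d r =>
      right
      have hdf : ((d == 'x') : Bool) = false := dropWhile_head_false _ cs d r (hl1 ▸ hll)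
      have hdm : d ∈ cs := mem_of_mem_dropWhile (hl1 ▸ (by rw [hll]; exact List.mem_cons_self : d ∈ l1))
      have hd : d = 'y' := by
        rcases hxy d hdm with h | h
        · simp [h] at hdf
        · exact h
      exact ⟨r, by rw [hd]⟩
  have hxy1 : ∀ c ∈ l1, c = 'x' ∨ c = 'y' := fun c hc =>
    hxy c (mem_of_mem_dropWhile (hl1 ▸ hc))
  have hA := outer_spec (l1.length + 1) l1 (0 + xcI cs - a) (0 + xcI cs - a)
    hxy1 hhd (le_refl _) (by omega)
  rw [hA]
  -- B side
  rw [bfold_eq cs hxy]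
  have h1 := best_le_xc l1
  have h2 : best l1 = best cs := best_dropX cs
  omega
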